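-- pv_equiv track=rewrite | github.com/studentUnk/Crypto | playfair.py | remover_caracter
-- ===== SOURCE A (Python) =====
-- def remover_caracter(mensaje, caracter):
--  pos = 0
--  while(pos < len(mensaje)):
--   if(mensaje[pos] == caracter and pos > 0):
--    if((pos+1) == len(mensaje)): # Remover caracter al final
--     mensaje = mensaje[0:pos]
--    else:
--     if(mensaje[pos-1] == mensaje[pos+1]): # Caracteres iguales
--      if(validar_caracter(mensaje[pos-1]) and validar_caracter(mensaje[pos+1])): #Validar extremos
--       mensaje = mensaje[0:pos] + mensaje[pos+1:len(mensaje)] # Remover caracter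
--
--   pos = pos+1
--  return mensaje
--
-- def validar_caracter(caracter):
--  return caracter.isalpha() or caracter.isdigit()
-- ===== SOURCE B (Python) =====
-- def validar_caracter(caracter):
--     return caracter.isalpha() or caracter.isdigit()
--
-- def remover_caracter(mensaje, caracter):
--     # single left-to-right pass over the original string; never rebuilds the string
--     out = []
--     i = 0
--     n = len(mensaje)
--     while i < n:
--         c = mensaje[i]
--         if c == caracter and out:
--             if i + 1 == n:
--                 break  # filler at the very end: drop it
--             nxt = mensaje[i + 1]
--             if out[-1] == nxt and validar_caracter(nxt):
--                 out.append(nxt)  # drop the filler, keep the neighbour, skip past it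
--                 i += 2
--                 continue
--         out.append(c)
--         i += 1
--     return ''.join(out)
-- ===== Notes on version B (the rewrite author's own statement) =====
-- stated objective: alternative
-- what changed: Replaces A's while-loop that mutates the string by slicing and rebuilding it on every removal with a single left-to-right pass over the original string that builds the output list incrementally, replaying the neighbour conditions against the last kept character and skipping past a removed filler.
import Mathlib
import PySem

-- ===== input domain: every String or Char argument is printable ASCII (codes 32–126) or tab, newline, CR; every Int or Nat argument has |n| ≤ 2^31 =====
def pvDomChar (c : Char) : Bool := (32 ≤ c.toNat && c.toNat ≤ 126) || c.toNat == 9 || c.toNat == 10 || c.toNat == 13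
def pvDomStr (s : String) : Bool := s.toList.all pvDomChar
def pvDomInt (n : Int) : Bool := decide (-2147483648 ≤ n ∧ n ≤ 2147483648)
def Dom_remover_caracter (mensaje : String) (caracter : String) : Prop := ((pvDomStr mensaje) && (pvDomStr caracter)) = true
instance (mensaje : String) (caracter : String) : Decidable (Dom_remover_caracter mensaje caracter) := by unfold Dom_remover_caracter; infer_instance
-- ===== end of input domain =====

-- B replaces A's slice-and-rebuild while-loop (index over a mutating string) by one
-- left-to-right pass over the original string building the output incrementally (objective: alternative).


-- ===== PORT A =====
-- Python's 1-char isalpha/isdigit, exact on the printable-ASCII domain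
def validar_caracter (c : Char) : Bool := c.isAlpha || c.isDigit

-- the while-loop of A: `mensaje` is the (mutating) string, `pos` the index;
-- mensaje[pos] == caracter compares a 1-char string with `caracter`, hence [c] = caracter;
-- slices mensaje[0:pos] / mensaje[pos+1:len] are take/drop (indices are in range here)
def loopA (caracter : List Char) (mensaje : List Char) (pos : Nat) : List Char :=
  if h : pos < mensaje.length then
    if h1 : [mensaje[pos]] = caracter ∧ 0 < pos then
      if h2 : pos + 1 = mensaje.length then
        loopA caracter (mensaje.take pos) (pos + 1)
      else
        if mensaje[pos - 1]'(by omega) = mensaje[pos + 1]'(by omega) then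
          if validar_caracter (mensaje[pos - 1]'(by omega)) ∧
             validar_caracter (mensaje[pos + 1]'(by omega)) then
            loopA caracter (mensaje.take pos ++ mensaje.drop (pos + 1)) (pos + 1)
          else loopA caracter mensaje (pos + 1)
        else loopA caracter mensaje (pos + 1)
    else loopA caracter mensaje (pos + 1)
  else mensaje
termination_by mensaje.length - pos
decreasing_by all_goals first
  | omega
  | (simp only [List.length_take, List.length_append, List.length_drop]; omega)

def remover_caracter (mensaje : String) (caracter : String) : String :=
  String.mk (loopA caracter.toList mensaje.toList 0)

-- ===== PORT B =====
-- the single pass of Source B: `out` is the list built so far, `rem` the unread suffix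
def loopB (caracter : List Char) (out : List Char) (rem : List Char) : List Char :=
  match rem with
  | [] => out
  | c :: rest =>
    if [c] = caracter ∧ out ≠ [] then
      match hr : rest with
      | [] => out                               -- filler at the very end: drop it
      | d :: rest2 =>
        if out.getLast? = some d ∧ validar_caracter d then
          loopB caracter (out ++ [d]) rest2     -- drop filler, keep neighbour, skip it
        else loopB caracter (out ++ [c]) rest
    else loopB caracter (out ++ [c]) rest
termination_by rem.length
decreasing_by all_goals simp_all only [List.length_cons]; omega

def remover_caracter_alt (mensaje : String) (caracter : String) : String :=
  String.mk (loopB caracter.toList [] mensaje.toList)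

-- ===== PRECONDITION & SPEC =====
def Spec_remover_caracter (mensaje : String) (caracter : String) (out : String) : Prop := out = remover_caracter_alt mensaje caracter
instance (mensaje : String) (caracter : String) (out : String) : Decidable (Spec_remover_caracter mensaje caracter out) := by unfold Spec_remover_caracter; infer_instance

-- ===== CLAIM (what is proved, stated in full; the proofs are below) =====
def Claim_equal_remover_caracter : Prop := ∀ (mensaje : String) (caracter : String), Dom_remover_caracter mensaje caracter → Spec_remover_caracter mensaje caracter (remover_caracter mensaje caracter)

-- ===== LEMMAS AND PROOFS =====

-- invariant: in A's loop the current string is out ++ rem with pos = out.length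
lemma loop_eq (caracter : List Char) :
    ∀ (n : Nat) (out rem : List Char), rem.length ≤ n →
      loopA caracter (out ++ rem) out.length = loopB caracter out rem := by
  intro n
  induction n with
  | zero =>
    intro out rem h
    have : rem = [] := List.length_eq_zero_iff.mp (Nat.le_zero.mp h)
    subst this
    simp [loopA, loopB]
  | succ n ih =>
    intro out rem h
    match rem with
    | [] => simp [loopA, loopB]
    | c :: rest =>
      rw [loopA]
      have hlt : out.length < (out ++ c :: rest).length := by simp
      have hget : (out ++ c :: rest)[out.length]'hlt = c := by
        simp [List.getElem_append_right]
      rw [dif_pos hlt]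
      by_cases h1 : [(out ++ c :: rest)[out.length]'hlt] = caracter ∧ 0 < out.length
      · rw [dif_pos h1]
        have hout : out ≠ [] := by
          intro he; subst he; exact absurd h1.2 (by simp)
        have hB1 : ([c] = caracter ∧ out ≠ []) := ⟨hget ▸ h1.1, hout⟩
        match rest with
        | [] =>
          -- trailing filler: A truncates; its loop then exits
          have hlen : out.length + 1 = (out ++ [c]).length := by simp
          rw [dif_pos hlen]
          have htake : (out ++ [c]).take out.length = out := by simp
          rw [htake, loopA]
          rw [dif_neg (by omega : ¬ (out.length + 1 < out.length))]
          simp only [loopB]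
          rw [if_pos hB1]
        | d :: rest2 =>
          have hlen : ¬ (out.length + 1 = (out ++ c :: d :: rest2).length) := by
            simp only [List.length_append, List.length_cons]; omega
          rw [dif_neg hlen]
          have hprev : (out ++ c :: d :: rest2)[out.length - 1]'(by simp only [List.length_append, List.length_cons]; omega)
              = out[out.length - 1]'(by omega) := by
            rw [List.getElem_append_left (by omega)]
          have hnext : (out ++ c :: d :: rest2)[out.length + 1]'(by simp only [List.length_append, List.length_cons]; omega) = d := by
            simp [List.getElem_append_right]
          have hlast : out.getLast? = some (out[out.length - 1]'(by omega)) := by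
            rw [List.getLast?_eq_getElem?, List.getElem?_eq_getElem (by omega)]
          have htake : (out ++ c :: d :: rest2).take out.length = out := by simp
          have hdrop : (out ++ c :: d :: rest2).drop (out.length + 1) = d :: rest2 := by
            simpa using List.drop_append (l₁ := out) (l₂ := c :: d :: rest2) 1
          rw [hprev, hnext]
          by_cases heq : out[out.length - 1]'(by omega) = d
          · rw [if_pos heq]
            by_cases hval : (validar_caracter (out[out.length - 1]'(by omega)) = true ∧
                validar_caracter d = true)
            · rw [if_pos hval, htake, hdrop]
              have hsplit : out ++ d :: rest2 = (out ++ [d]) ++ rest2 := by simp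
              rw [hsplit]
              have hl : out.length + 1 = (out ++ [d]).length := by simp
              rw [hl, ih (out ++ [d]) rest2 (by simp only [List.length_cons] at h; omega)]
              have hBc : out.getLast? = some d ∧ validar_caracter d = true :=
                ⟨by rw [← heq]; exact hlast, hval.2⟩
              simp only [loopB]
              rw [if_pos hB1, if_pos hBc]
            · rw [if_neg hval]
              have hsplit : out ++ c :: d :: rest2 = (out ++ [c]) ++ d :: rest2 := by simp
              rw [hsplit]
              have hl : out.length + 1 = (out ++ [c]).length := by simp
              rw [hl, ih (out ++ [c]) (d :: rest2) (by simp only [List.length_cons] at h ⊢; omega)]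
              have hBc : ¬ (out.getLast? = some d ∧ validar_caracter d = true) := by
                intro ⟨_, hv⟩
                exact hval ⟨by rw [heq]; exact hv, hv⟩
              simp only [loopB]
              rw [if_pos hB1, if_neg hBc]
          · rw [if_neg heq]
            have hsplit : out ++ c :: d :: rest2 = (out ++ [c]) ++ d :: rest2 := by simp
            rw [hsplit]
            have hl : out.length + 1 = (out ++ [c]).length := by simp
            rw [hl, ih (out ++ [c]) (d :: rest2) (by simp only [List.length_cons] at h ⊢; omega)]
            have hBc : ¬ (out.getLast? = some d ∧ validar_caracter d = true) := by
              intro ⟨hg, _⟩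
              apply heq
              rw [hlast] at hg
              exact Option.some.inj hg
            simp only [loopB]
            rw [if_pos hB1, if_neg hBc]
      · rw [dif_neg h1]
        have hsplit : out ++ c :: rest = (out ++ [c]) ++ rest := by simp
        rw [hsplit]
        have hl : out.length + 1 = (out ++ [c]).length := by simp
        rw [hl, ih (out ++ [c]) rest (by simp only [List.length_cons] at h; omega)]
        have hB1 : ¬ ([c] = caracter ∧ out ≠ []) := by
          intro ⟨hc, ho⟩
          apply h1
          refine ⟨by rw [hget]; exact hc, ?_⟩
          cases out with
          | nil => exact absurd rfl ho
          | cons a t => simp only [List.length_cons]; omega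
        cases rest with
        | nil => simp only [loopB]; rw [if_neg hB1]
        | cons d rest2 =>
          conv_rhs => rw [loopB]
          rw [if_neg hB1]


-- ===== VERDICT (by name: the statement is the Claim_ definition above) =====
theorem remover_caracter_spec : Claim_equal_remover_caracter := by
  intro mensaje caracter _
  unfold Spec_remover_caracter remover_caracter remover_caracter_alt
  have h2 : loopA caracter.toList mensaje.toList 0 = loopB caracter.toList [] mensaje.toList := by
    simpa using loop_eq caracter.toList mensaje.toList.length [] mensaje.toList le_rfl
  exact congrArg String.mk h2
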